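-- pv_equiv track=rewrite | github.com/BillieEyelash/Honors-Precalculus | Unit-1/PolySeq.py | sequence_terms
-- ===== SOURCE A (Python) =====
-- def sequence_terms(coefficients, numTerms):
--     ''' Description: Calculate the first n terms of a polynomial sequence
--         Parameters: List of coefficients, Integer number of terms
--         Return: List of terms '''
--     terms = []
--     # Calculate each term
--     for k in range(1, numTerms + 1):
--         pk = 0
--         # Calculate each element of the term
--         for i in range(len(coefficients)):
--             pk += coefficients[i] * k ** i
--         terms.append(pk)
--     return terms
-- ===== SOURCE B (Python) =====
-- def sequence_terms(coefficients, numTerms):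
--     ''' Same result as A: k-th term is the polynomial value at k,
--         but evaluated by Horner's rule (no exponentiation). '''
--     def horner(k):
--         acc = 0
--         for c in reversed(coefficients):
--             acc = acc * k + c
--         return acc
--     return [horner(k) for k in range(1, numTerms + 1)]
-- ===== Notes on version B (the rewrite author's own statement) =====
-- stated objective: faster
-- what changed: Replaces the per-term sum of coefficients[i]*k**i (recomputing k**i each time) by Horner's rule over the reversed coefficient list, building the result as a comprehension instead of append-in-a-loop.
import Mathlib
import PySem

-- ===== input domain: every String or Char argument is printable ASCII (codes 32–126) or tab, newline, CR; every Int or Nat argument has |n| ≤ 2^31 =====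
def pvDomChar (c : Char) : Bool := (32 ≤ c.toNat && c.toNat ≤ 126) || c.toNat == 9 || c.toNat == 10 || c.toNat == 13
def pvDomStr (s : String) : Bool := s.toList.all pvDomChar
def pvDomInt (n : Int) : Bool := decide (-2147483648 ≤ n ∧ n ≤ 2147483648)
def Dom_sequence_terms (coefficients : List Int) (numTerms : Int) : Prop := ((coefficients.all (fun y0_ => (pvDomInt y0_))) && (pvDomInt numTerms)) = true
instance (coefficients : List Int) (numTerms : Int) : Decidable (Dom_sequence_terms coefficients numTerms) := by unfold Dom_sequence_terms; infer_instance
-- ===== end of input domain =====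

-- ===== PORT A =====
-- A: for each k in 1..numTerms, sum coefficients[i]*k**i over i in range(len(coefficients))
def sequence_terms (coefficients : List Int) (numTerms : Int) : List Int :=
  (PySem.List.pyRange 1 (numTerms + 1) 1).foldl
    (fun terms k =>
      terms ++ [(List.range coefficients.length).foldl
        (fun pk i => pk + coefficients.getD i 0 * k ^ i) 0])
    []

-- ===== PORT B =====
-- B: Horner's rule over the reversed coefficient list; one line per B's comprehension
def pvHorner (coefficients : List Int) (k : Int) : Int :=
  coefficients.reverse.foldl (fun acc c => acc * k + c) 0

def sequence_terms_alt (coefficients : List Int) (numTerms : Int) : List Int :=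
  (PySem.List.pyRange 1 (numTerms + 1) 1).map (pvHorner coefficients)

-- ===== PRECONDITION & SPEC =====
def Spec_sequence_terms (coefficients : List Int) (numTerms : Int) (out : List Int) : Prop := out = sequence_terms_alt coefficients numTerms
instance (coefficients : List Int) (numTerms : Int) (out : List Int) : Decidable (Spec_sequence_terms coefficients numTerms out) := by unfold Spec_sequence_terms; infer_instance

-- ===== CLAIM (what is proved, stated in full; the proofs are below) =====
def Claim_equal_sequence_terms : Prop := ∀ (coefficients : List Int) (numTerms : Int), Dom_sequence_terms coefficients numTerms → Spec_sequence_terms coefficients numTerms (sequence_terms coefficients numTerms)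

-- ===== LEMMAS AND PROOFS =====

-- polynomial value, the common meaning of both loops
def pvPoly (c : List Int) (k : Int) : Int :=
  match c with
  | [] => 0
  | a :: t => a + k * pvPoly t k

theorem horner_eq_poly (c : List Int) (k : Int) : pvHorner c k = pvPoly c k := by
  induction c with
  | nil => rfl
  | cons a t ih =>
    simp only [pvHorner, List.reverse_cons, List.foldl_append, List.foldl_cons, List.foldl_nil] at *
    rw [ih]; simp only [pvPoly]; ring

theorem foldl_range_sum (g : Nat → Int) (n : Nat) (s : Int) :
    (List.range n).foldl (fun pk i => pk + g i) s = s + ∑ i ∈ Finset.range n, g i := by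
  induction n generalizing s with
  | zero => simp
  | succ m ih => rw [List.range_succ, List.foldl_append, ih, Finset.sum_range_succ]; simp; ring

theorem sum_eq_poly (c : List Int) (k : Int) :
    (∑ i ∈ Finset.range c.length, c.getD i 0 * k ^ i) = pvPoly c k := by
  induction c with
  | nil => simp [pvPoly]
  | cons a t ih =>
    rw [List.length_cons, Finset.sum_range_succ']
    simp only [List.getD_cons_succ, List.getD_cons_zero, pow_zero, mul_one, pow_succ]
    rw [show pvPoly (a :: t) k = a + k * pvPoly t k from rfl, ← ih, Finset.mul_sum, add_comm]
    congr 1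
    apply Finset.sum_congr rfl
    intro i _; ring

theorem foldl_append_map (f : Int → Int) (xs : List Int) (acc : List Int) :
    xs.foldl (fun terms k => terms ++ [f k]) acc = acc ++ xs.map f := by
  induction xs generalizing acc with
  | nil => simp
  | cons x t ih => simp [ih]

-- ===== VERDICT (by name: the statement is the Claim_ definition above) =====
theorem sequence_terms_spec : Claim_equal_sequence_terms := by
  intro c n _
  unfold Spec_sequence_terms sequence_terms sequence_terms_alt
  rw [foldl_append_map]
  simp only [List.nil_append]
  apply List.map_congr_left
  intro k _
  rw [foldl_range_sum, sum_eq_poly, horner_eq_poly]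
  simp
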